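-- pv_equiv track=rewrite | github.com/gujord/pwa-validator | pwa-validate.py | validate_icons
-- ===== SOURCE A (Python) =====
-- from typing import Dict, List, Any
--
-- def validate_icons(icons: List[Dict[str, Any]]) -> List[str]:
--     if not icons:
--         return ["No icons found in manifest"]
--
--     required_sizes = {
--         "192x192": False,
--         "512x512": False,
--         "maskable": False
--     }
--
--     issues = []
--     for icon in icons:
--         if 'sizes' in icon:
--             if '192x192' in icon['sizes']:
--                 required_sizes['192x192'] = True
--             if '512x512' in icon['sizes']:
--                 required_sizes['512x512'] = True
--         if 'purpose' in icon and 'maskable' in icon['purpose']: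
--             required_sizes['maskable'] = True
--
--     if not required_sizes['192x192']:
--         issues.append("[WARN] Missing 192x192 icon")
--     if not required_sizes['512x512']:
--         issues.append("[WARN] Missing 512x512 icon")
--     if not required_sizes['maskable']:
--         issues.append("[WARN] Missing maskable icon")
--
--     return issues
-- ===== SOURCE B (Python) =====
-- from typing import Dict, List, Any
--
-- def validate_icons(icons: List[Dict[str, Any]]) -> List[str]:
--     if not icons:
--         return ["No icons found in manifest"]
--     has_192 = any('sizes' in i and '192x192' in i['sizes'] for i in icons)
--     has_512 = any('sizes' in i and '512x512' in i['sizes'] for i in icons)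
--     has_maskable = any('purpose' in i and 'maskable' in i['purpose'] for i in icons)
--     issues = []
--     if not has_192:
--         issues.append("[WARN] Missing 192x192 icon")
--     if not has_512:
--         issues.append("[WARN] Missing 512x512 icon")
--     if not has_maskable:
--         issues.append("[WARN] Missing maskable icon")
--     return issues
-- ===== Notes on version B (the rewrite author's own statement) =====
-- stated objective: simpler
-- what changed: Replaces the single flag-accumulating dict pass with three independent any(...) scans, one per required property, dropping the mutable required_sizes dict entirely.
import Mathlib
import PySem

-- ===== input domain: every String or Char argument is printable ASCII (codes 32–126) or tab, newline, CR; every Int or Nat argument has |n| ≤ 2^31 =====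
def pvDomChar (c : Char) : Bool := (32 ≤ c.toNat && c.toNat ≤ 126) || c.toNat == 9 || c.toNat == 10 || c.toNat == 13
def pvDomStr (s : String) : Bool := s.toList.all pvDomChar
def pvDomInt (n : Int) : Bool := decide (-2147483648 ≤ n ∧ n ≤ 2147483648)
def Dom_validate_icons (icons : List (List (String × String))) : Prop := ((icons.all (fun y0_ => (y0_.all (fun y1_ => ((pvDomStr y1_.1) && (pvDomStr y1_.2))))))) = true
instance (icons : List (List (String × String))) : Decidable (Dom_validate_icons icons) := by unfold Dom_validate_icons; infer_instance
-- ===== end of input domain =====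

-- B replaces A's single flag-accumulating dict pass with three independent any-scans (objective: simpler).

-- ===== PORT A =====
-- loop body of A's single pass, updating the required_sizes dict
def pvStepA (r : PySem.Dict String Bool) (icon : List (String × String)) : PySem.Dict String Bool :=
  let d := PySem.Dict.mk icon
  let r :=
    if d.contains "sizes" then
      let s := (d.get? "sizes").getD ""   -- guarded by contains, so exact for icon['sizes']
      let r := if PySem.Str.isIn "192x192" s then r.insert "192x192" true else r
      if PySem.Str.isIn "512x512" s then r.insert "512x512" true else r
    else r
  if d.contains "purpose" && PySem.Str.isIn "maskable" ((d.get? "purpose").getD "") then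
    r.insert "maskable" true
  else r

def validate_icons (icons : List (List (String × String))) : List String :=
  if icons = [] then ["No icons found in manifest"]
  else
    let required := ((PySem.Dict.empty.insert "192x192" false).insert "512x512" false).insert "maskable" false
    let required := icons.foldl pvStepA required
    let issues : List String := []
    let issues := if !(required.getD "192x192" false) then issues ++ ["[WARN] Missing 192x192 icon"] else issues
    let issues := if !(required.getD "512x512" false) then issues ++ ["[WARN] Missing 512x512 icon"] else issues
    if !(required.getD "maskable" false) then issues ++ ["[WARN] Missing maskable icon"] else issues

-- ===== PORT B =====
-- 'sizes' in i and sz in i['sizes']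
def pvHasSize (sz : String) (i : List (String × String)) : Bool :=
  (PySem.Dict.mk i).contains "sizes" && PySem.Str.isIn sz (((PySem.Dict.mk i).get? "sizes").getD "")

-- 'purpose' in i and 'maskable' in i['purpose']
def pvHasMaskable (i : List (String × String)) : Bool :=
  (PySem.Dict.mk i).contains "purpose" && PySem.Str.isIn "maskable" (((PySem.Dict.mk i).get? "purpose").getD "")

def validate_icons_alt (icons : List (List (String × String))) : List String :=
  if icons = [] then ["No icons found in manifest"]
  else
    let has192 := icons.any (pvHasSize "192x192")
    let has512 := icons.any (pvHasSize "512x512")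
    let hasMaskable := icons.any pvHasMaskable
    let issues : List String := []
    let issues := if !has192 then issues ++ ["[WARN] Missing 192x192 icon"] else issues
    let issues := if !has512 then issues ++ ["[WARN] Missing 512x512 icon"] else issues
    if !hasMaskable then issues ++ ["[WARN] Missing maskable icon"] else issues

-- ===== PRECONDITION & SPEC =====
def Spec_validate_icons (icons : List (List (String × String))) (out : List String) : Prop := out = validate_icons_alt icons
instance (icons : List (List (String × String))) (out : List String) : Decidable (Spec_validate_icons icons out) := by unfold Spec_validate_icons; infer_instance

-- ===== CLAIM (what is proved, stated in full; the proofs are below) =====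
def Claim_equal_validate_icons : Prop := ∀ (icons : List (List (String × String))), Dom_validate_icons icons → Spec_validate_icons icons (validate_icons icons)

-- ===== LEMMAS AND PROOFS =====

lemma getD_step192 (r : PySem.Dict String Bool) (i : List (String × String)) :
    (pvStepA r i).getD "192x192" false = (r.getD "192x192" false || pvHasSize "192x192" i) := by
  simp only [pvStepA, pvHasSize]
  split_ifs <;> simp_all [PySem.Dict.getD_insert, -PySem.Dict.contains_mk]

lemma getD_step512 (r : PySem.Dict String Bool) (i : List (String × String)) :
    (pvStepA r i).getD "512x512" false = (r.getD "512x512" false || pvHasSize "512x512" i) := by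
  simp only [pvStepA, pvHasSize]
  split_ifs <;> simp_all [PySem.Dict.getD_insert, -PySem.Dict.contains_mk]

lemma getD_stepMask (r : PySem.Dict String Bool) (i : List (String × String)) :
    (pvStepA r i).getD "maskable" false = (r.getD "maskable" false || pvHasMaskable i) := by
  simp only [pvStepA, pvHasMaskable]
  split_ifs <;> simp_all [PySem.Dict.getD_insert, -PySem.Dict.contains_mk]

lemma foldl_getD (icons : List (List (String × String))) (key : String)
    (p : List (String × String) → Bool)
    (hstep : ∀ r i, (pvStepA r i).getD key false = (r.getD key false || p i)) :
    ∀ r : PySem.Dict String Bool,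
      (icons.foldl pvStepA r).getD key false = (r.getD key false || icons.any p) := by
  induction icons with
  | nil => intro r; simp
  | cons i rest ih =>
      intro r
      simp only [List.foldl_cons, List.any_cons, ih, hstep, Bool.or_assoc]

theorem validate_icons_spec : Claim_equal_validate_icons := by
  intro icons _
  unfold Spec_validate_icons validate_icons validate_icons_alt
  by_cases h : icons = []
  · simp [h]
  · simp only [if_neg h]
    rw [foldl_getD icons "192x192" (pvHasSize "192x192") getD_step192,
        foldl_getD icons "512x512" (pvHasSize "512x512") getD_step512,
        foldl_getD icons "maskable" pvHasMaskable getD_stepMask]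
    simp [PySem.Dict.getD_insert]
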